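-- pv_equiv track=rewrite | github.com/Siddharth230/Python | WEEK 07/Data Processing 3.py | longest_antakshari_subsequence
-- ===== SOURCE A (Python) =====
-- def longest_antakshari_subsequence(seq):
--     words = seq.split(",")
--     max_len = 1
--     curr_len = 1
--
--     for i in range(1, len(words)):
--         if words[i - 1][-1] == words[i][0]:
--             curr_len += 1
--             max_len = max(max_len, curr_len)
--         else:
--             curr_len = 1  # reset the length
--
--     return max_len
-- ===== SOURCE B (Python) =====
-- def longest_antakshari_subsequence(seq):
--     words = seq.split(",")
--     flags = [words[i - 1][-1] == words[i][0] for i in range(1, len(words))]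
--     breaks = [-1] + [i for i, f in enumerate(flags) if not f] + [len(flags)]
--     return max(b - a for a, b in zip(breaks, breaks[1:]))
-- ===== Notes on version B (the rewrite author's own statement) =====
-- stated objective: alternative
-- what changed: A's single fused loop carrying (max_len, curr_len) accumulators is replaced by two separate passes: build the list of chain flags, collect the positions of the non-chaining breaks (with sentinels -1 and len(flags)), and return the maximum gap between consecutive break positions.
import Mathlib
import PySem

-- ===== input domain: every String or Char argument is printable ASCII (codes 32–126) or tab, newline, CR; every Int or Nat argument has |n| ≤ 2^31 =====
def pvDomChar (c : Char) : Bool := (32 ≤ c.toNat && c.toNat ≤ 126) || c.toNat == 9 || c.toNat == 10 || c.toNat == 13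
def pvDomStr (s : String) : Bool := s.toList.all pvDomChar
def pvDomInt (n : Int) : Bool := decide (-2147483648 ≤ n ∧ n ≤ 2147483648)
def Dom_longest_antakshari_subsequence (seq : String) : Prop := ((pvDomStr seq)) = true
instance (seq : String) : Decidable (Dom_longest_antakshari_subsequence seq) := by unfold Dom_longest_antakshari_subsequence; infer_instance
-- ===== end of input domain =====

-- B replaces A's fused max/current-run accumulator loop by two separate passes: a chain-flag
-- table, then the largest gap between consecutive break (non-chain) positions; objective: alternative decomposition, same O(n) cost.

-- ===== PORT A =====
-- shared helper: words = seq.split(",")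
def laWords (seq : String) : List String := (PySem.Str.split? seq ",").getD []

-- literal port of A: one fold over range(1, len(words)) carrying (max_len, curr_len)
def longest_antakshari_subsequence (seq : String) : Int :=
  ((PySem.List.pyRange 1 ((laWords seq).length : Int) 1).foldl
    (fun (st : Int × Int) i =>
      if PySem.Str.pyGet? ((PySem.List.pyGet? (laWords seq) (i - 1)).getD "") (-1)
           = PySem.Str.pyGet? ((PySem.List.pyGet? (laWords seq) i).getD "") 0
      then (max st.1 (st.2 + 1), st.2 + 1)
      else (st.1, 1))
    (1, 1)).1

-- ===== PORT B =====
-- B's flag table: flags = [words[i-1][-1] == words[i][0] for i in range(1, len(words))]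
def laFlags (words : List String) : List Bool :=
  (PySem.List.pyRange 1 (words.length : Int) 1).map
    (fun i => decide (PySem.Str.pyGet? ((PySem.List.pyGet? words (i - 1)).getD "") (-1)
         = PySem.Str.pyGet? ((PySem.List.pyGet? words i).getD "") 0))

-- B's break positions: breaks = [-1] + [i for i, f in enumerate(flags) if not f] + [len(flags)]
def laBreaks (flags : List Bool) : List Int :=
  [-1] ++ ((PySem.List.enumerate flags 0).filter (fun p : Int × Bool => !p.2)).map
      (fun p : Int × Bool => p.1)
    ++ [(flags.length : Int)]

-- literal port of B: max(b - a for a, b in zip(breaks, breaks[1:]))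
def longest_antakshari_subsequence_alt (seq : String) : Int :=
  (PySem.List.max?
      (((laBreaks (laFlags (laWords seq))).zip
          (PySem.List.slice (laBreaks (laFlags (laWords seq))) (some 1))).map
        (fun p : Int × Int => p.2 - p.1))
      (fun y => y)).getD 0

-- ===== PRECONDITION & SPEC =====
-- Pre_ excludes exactly the inputs where Python A raises IndexError: a comma-split producing
-- an empty word while there are at least two words (words[i-1][-1] / words[i][0] on "").
def Pre_longest_antakshari_subsequence (seq : String) : Prop :=
  ((PySem.Str.split? seq ",").getD []).length ≤ 1 ∨
    ∀ w ∈ (PySem.Str.split? seq ",").getD [], w ≠ ""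
instance (seq : String) : Decidable (Pre_longest_antakshari_subsequence seq) := by
  unfold Pre_longest_antakshari_subsequence; infer_instance

def pvWitness_longest_antakshari_subsequence : String := "era,ab,ba,at"

def Spec_longest_antakshari_subsequence (seq : String) (out : Int) : Prop := out = longest_antakshari_subsequence_alt seq
instance (seq : String) (out : Int) : Decidable (Spec_longest_antakshari_subsequence seq out) := by unfold Spec_longest_antakshari_subsequence; infer_instance

-- ===== CLAIM (what is proved, stated in full; the proofs are below) =====
def Claim_equal_longest_antakshari_subsequence : Prop := ∀ (seq : String), Dom_longest_antakshari_subsequence seq → Pre_longest_antakshari_subsequence seq → Spec_longest_antakshari_subsequence seq (longest_antakshari_subsequence seq)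

-- ===== LEMMAS AND PROOFS =====

-- A's loop step, over a precomputed flag
def laStep : Int × Int → Bool → Int × Int
  | st, true => (max st.1 (st.2 + 1), st.2 + 1)
  | st, false => (st.1, 1)

-- "best chain value" of a flag list given current chain length c
def laG : Int → List Bool → Int
  | c, [] => c
  | c, true :: l => laG (c + 1) l
  | c, false :: l => max c (laG 1 l)

-- positions of the False flags, counting from p
def laFI : Int → List Bool → List Int
  | _, [] => []
  | p, true :: l => laFI (p + 1) l
  | p, false :: l => p :: laFI (p + 1) l

-- B's final pass as a function of the break list
def laMG (bs : List Int) : Int :=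
  (PySem.List.max? ((bs.zip (bs.drop 1)).map (fun p => p.2 - p.1)) (fun y => y)).getD 0

lemma laG_ge (l : List Bool) : ∀ c : Int, c ≤ laG c l := by
  induction l with
  | nil => intro c; simp [laG]
  | cons b l ih =>
      intro c; cases b
      · show c ≤ max c (laG 1 l)
        exact le_max_left _ _
      · show c ≤ laG (c + 1) l
        exact le_trans (by omega) (ih (c + 1))

lemma laFoldl (l : List Bool) : ∀ m c : Int, 1 ≤ c → c ≤ m →
    (l.foldl laStep (m, c)).1 = max m (laG c l) := by
  induction l with
  | nil => intro m c _ h; simp [laG]; omega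
  | cons b l ih =>
      intro m c h1 h; cases b
      · show (l.foldl laStep (m, 1)).1 = max m (laG c (false :: l))
        rw [ih m 1 le_rfl (by omega)]
        show max m (laG 1 l) = max m (max c (laG 1 l))
        omega
      · show (l.foldl laStep (max m (c + 1), c + 1)).1 = max m (laG c (true :: l))
        rw [ih (max m (c + 1)) (c + 1) (by omega) (le_max_right _ _)]
        show max (max m (c + 1)) (laG (c + 1) l) = max m (laG (c + 1) l)
        have := laG_ge l (c + 1)
        omega

lemma laEnum (l : List Bool) : ∀ s : Int,
    ((PySem.List.enumerate l s).filter (fun p : Int × Bool => !p.2)).map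
      (fun p : Int × Bool => p.1) = laFI s l := by
  induction l with
  | nil => intro s; simp [PySem.List.enumerate_nil, laFI]
  | cons b l ih =>
      intro s; cases b <;>
        simp [PySem.List.enumerate_cons, laFI, ih (s + 1)]

lemma foldl_max_init (l : List Int) : ∀ x y : Int,
    l.foldl max (max x y) = max x (l.foldl max y) := by
  induction l with
  | nil => intro x y; simp
  | cons a l ih =>
      intro x y
      simp only [List.foldl_cons, max_assoc, ih]

lemma laMG_cons (a b c : Int) (t : List Int) :
    laMG (a :: b :: c :: t) = max (b - a) (laMG (b :: c :: t)) := by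
  simp only [laMG, List.drop, List.zip_cons_cons, List.map_cons, PySem.List.max?_id_cons,
    Option.getD_some]
  exact foldl_max_init _ (b - a) (c - b)

lemma laMain (l : List Bool) : ∀ p prev : Int,
    laMG (prev :: (laFI p l ++ [p + (l.length : Int)])) = laG (p - prev) l := by
  induction l with
  | nil =>
      intro p prev
      simp [laFI, laMG, laG, PySem.List.max?_id_cons]
  | cons b l ih =>
      intro p prev
      have hlen : p + (((b :: l).length : Int)) = (p + 1) + (l.length : Int) := by
        push_cast [List.length_cons]; omega
      cases b
      · -- false: a break at position p
        have hcons : laFI p (false :: l) = p :: laFI (p + 1) l := rfl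
        rw [hcons, hlen]
        have h2 := ih (p + 1) p
        rcases h : laFI (p + 1) l ++ [(p + 1) + (l.length : Int)] with _ | ⟨c, t⟩
        · exact absurd h (by simp)
        · rw [List.cons_append, h, laMG_cons, ← h, h2]
          show max (p - prev) (laG ((p + 1) - p) l) = laG (p - prev) (false :: l)
          have hpp : (p + 1) - p = (1 : Int) := by omega
          rw [hpp]
          rfl
      · -- true: chain continues
        have hcons : laFI p (true :: l) = laFI (p + 1) l := rfl
        rw [hcons, hlen, ih (p + 1) prev]
        have hsucc : p + 1 - prev = (p - prev) + 1 := by omega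
        rw [hsucc]; rfl

-- B's second pass equals laG 1
lemma laB (flags : List Bool) :
    (PySem.List.max?
        (((laBreaks flags).zip (PySem.List.slice (laBreaks flags) (some 1))).map
          (fun p : Int × Int => p.2 - p.1))
        (fun y => y)).getD 0 = laG 1 flags := by
  unfold laBreaks
  rw [PySem.List.slice_from _ (by norm_num : (0:Int) ≤ (1:Int))]
  rw [laEnum flags 0]
  have hbr : ([-1] ++ laFI 0 flags ++ [(flags.length : Int)])
      = (-1 : Int) :: (laFI 0 flags ++ [(0 : Int) + (flags.length : Int)]) := by
    simp
  rw [hbr]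
  have hdrop : List.drop (1:Int).toNat
      ((-1 : Int) :: (laFI 0 flags ++ [(0 : Int) + (flags.length : Int)]))
      = laFI 0 flags ++ [(0 : Int) + (flags.length : Int)] := by
    simp
  rw [hdrop]
  show laMG ((-1 : Int) :: (laFI 0 flags ++ [(0 : Int) + (flags.length : Int)])) = laG 1 flags
  have hmain := laMain flags 0 (-1)
  have h01 : (0 : Int) - (-1) = 1 := by norm_num
  rw [h01] at hmain
  exact hmain

lemma laIte (p : Prop) [Decidable p] (st : Int × Int) :
    (if p then (max st.1 (st.2 + 1), st.2 + 1) else (st.1, 1)) = laStep st (decide p) := by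
  by_cases h : p
  · rw [if_pos h, decide_eq_true h]
    rfl
  · rw [if_neg h, decide_eq_false h]
    rfl

set_option maxHeartbeats 1000000 in
lemma laA_eq_B (seq : String) :
    longest_antakshari_subsequence seq = longest_antakshari_subsequence_alt seq := by
  unfold longest_antakshari_subsequence longest_antakshari_subsequence_alt
  rw [laB (laFlags (laWords seq))]
  have hfun : (fun (st : Int × Int) i =>
      if PySem.Str.pyGet? ((PySem.List.pyGet? (laWords seq) (i - 1)).getD "") (-1)
           = PySem.Str.pyGet? ((PySem.List.pyGet? (laWords seq) i).getD "") 0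
      then (max st.1 (st.2 + 1), st.2 + 1)
      else (st.1, 1)) = fun (st : Int × Int) i => laStep st
        (decide (PySem.Str.pyGet? ((PySem.List.pyGet? (laWords seq) (i - 1)).getD "") (-1)
           = PySem.Str.pyGet? ((PySem.List.pyGet? (laWords seq) i).getD "") 0)) := by
    funext st i
    exact laIte _ st
  rw [hfun, ← List.foldl_map]
  rw [show ((PySem.List.pyRange 1 ((laWords seq).length : Int) 1).map
      (fun i => decide (PySem.Str.pyGet? ((PySem.List.pyGet? (laWords seq) (i - 1)).getD "") (-1)
         = PySem.Str.pyGet? ((PySem.List.pyGet? (laWords seq) i).getD "") 0)))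
      = laFlags (laWords seq) from rfl]
  rw [laFoldl (laFlags (laWords seq)) 1 1 le_rfl le_rfl]
  have := laG_ge (laFlags (laWords seq)) (1 : Int)
  omega

-- ===== VERDICT (by name: the statement is the Claim_ definition above) =====
theorem longest_antakshari_subsequence_spec : Claim_equal_longest_antakshari_subsequence := by
  intro seq _ _
  unfold Spec_longest_antakshari_subsequence
  exact laA_eq_B seq
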